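-- pv_equiv track=rewrite | github.com/alehdezp/alphaswarm-sol | tests/workflow_harness/lib/debrief_protocol.py | _infer_from_transcript
-- ===== SOURCE A (Python) =====
-- def _infer_from_transcript(transcript_text: str, questions: list[str]) -> list[str]:
--     """Infer debrief answers from transcript content.
--
--     Simple heuristic extraction -- looks for key phrases that map
--     to debrief questions. In future, this could use LLM summarization.
--     """
--     answers = []
--     lines = transcript_text.strip().split("\n")
--
--     for question in questions:
--         q_lower = question.lower()
--         # Simple keyword matching for common debrief topics
--         if "hypothesis" in q_lower or "conclusion" in q_lower:
--             answer = _find_relevant_lines(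
--                 lines, ["hypothesis", "conclusion", "strategy", "approach", "plan", "first"]
--             )
--         elif "bskg" in q_lower or "query" in q_lower or "queries" in q_lower:
--             answer = _find_relevant_lines(
--                 lines, ["query", "bskg", "alphaswarm", "graph"]
--             )
--         elif "surprised" in q_lower:
--             answer = _find_relevant_lines(
--                 lines, ["surprise", "unexpected", "surprising", "interesting"]
--             )
--         elif "evidence" in q_lower:
--             answer = _find_relevant_lines(
--                 lines, ["evidence", "found", "vulnerability", "finding", "supports"]
--             )
--         elif "contradict" in q_lower:
--             answer = _find_relevant_lines(
--                 lines, ["contradict", "against", "however", "but", "alternatively"]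
--             )
--         elif "investigate" in q_lower or "further" in q_lower:
--             answer = _find_relevant_lines(
--                 lines, ["investigate", "further", "next", "explore", "deeper"]
--             )
--         elif "confidence" in q_lower or "rate" in q_lower:
--             answer = _find_relevant_lines(
--                 lines, ["confidence", "certain", "sure", "rating", "high", "medium", "low"]
--             )
--         elif "strategy" in q_lower:
--             answer = _find_relevant_lines(
--                 lines, ["strategy", "approach", "plan", "first"]
--             )
--         elif "alternative" in q_lower:
--             answer = _find_relevant_lines(
--                 lines, ["alternative", "hypothesis", "consider", "reject"]
--             )
--         elif "differently" in q_lower: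
--             answer = _find_relevant_lines(
--                 lines, ["differently", "improve", "next time", "better"]
--             )
--         else:
--             answer = "[Could not infer from transcript]"
--
--         answers.append(answer)
--
--     return answers
--
-- def _find_relevant_lines(lines: list[str], keywords: list[str]) -> str:
--     """Find lines containing any of the given keywords."""
--     matches = []
--     for line in lines:
--         line_lower = line.lower()
--         if any(kw in line_lower for kw in keywords):
--             matches.append(line.strip())
--             if len(matches) >= 3:
--                 break
--
--     if matches:
--         return " | ".join(matches)
--     return "[No relevant content found in transcript]"
-- ===== SOURCE B (Python) =====
-- _NO_MATCH = "[No relevant content found in transcript]"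
-- _NO_RULE = "[Could not infer from transcript]"
--
-- # Ordered rule table: (trigger substrings, search keywords), same order as A's if/elif chain.
-- _RULES = [
--     (("hypothesis", "conclusion"), ["hypothesis", "conclusion", "strategy", "approach", "plan", "first"]),
--     (("bskg", "query", "queries"), ["query", "bskg", "alphaswarm", "graph"]),
--     (("surprised",), ["surprise", "unexpected", "surprising", "interesting"]),
--     (("evidence",), ["evidence", "found", "vulnerability", "finding", "supports"]),
--     (("contradict",), ["contradict", "against", "however", "but", "alternatively"]),
--     (("investigate", "further"), ["investigate", "further", "next", "explore", "deeper"]),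
--     (("confidence", "rate"), ["confidence", "certain", "sure", "rating", "high", "medium", "low"]),
--     (("strategy",), ["strategy", "approach", "plan", "first"]),
--     (("alternative",), ["alternative", "hypothesis", "consider", "reject"]),
--     (("differently",), ["differently", "improve", "next time", "better"]),
-- ]
--
--
-- def _infer_from_transcript(transcript_text: str, questions: list[str]) -> list[str]:
--     # Stage 1: ONE pass over the transcript, accumulating up to 3 matching
--     # lines for every rule simultaneously (A instead re-scans the transcript
--     # for each question).
--     accs = [[] for _ in _RULES]
--     for line in transcript_text.strip().split("\n"):
--         low = line.lower()
--         stripped = line.strip()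
--         for acc, (_, keywords) in zip(accs, _RULES):
--             if len(acc) < 3 and any(kw in low for kw in keywords):
--                 acc.append(stripped)
--     table = [" | ".join(acc) if acc else _NO_MATCH for acc in accs]
--
--     # Stage 2: each question is a pure lookup into the precomputed table.
--     answers = []
--     for question in questions:
--         q_lower = question.lower()
--         answer = _NO_RULE
--         for (triggers, _), precomputed in zip(_RULES, table):
--             if any(t in q_lower for t in triggers):
--                 answer = precomputed
--                 break
--         answers.append(answer)
--     return answers
-- ===== Notes on version B (the rewrite author's own statement) =====
-- stated objective: alternative
-- what changed: Inverts the traversal: instead of re-scanning the transcript for each question through a ten-branch if/elif chain, B makes ONE pass over the transcript lines accumulating up to 3 matches for all ten rules simultaneously into a precomputed answer table, and then answers each question by a pure first-trigger lookup into that table.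
import Mathlib
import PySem

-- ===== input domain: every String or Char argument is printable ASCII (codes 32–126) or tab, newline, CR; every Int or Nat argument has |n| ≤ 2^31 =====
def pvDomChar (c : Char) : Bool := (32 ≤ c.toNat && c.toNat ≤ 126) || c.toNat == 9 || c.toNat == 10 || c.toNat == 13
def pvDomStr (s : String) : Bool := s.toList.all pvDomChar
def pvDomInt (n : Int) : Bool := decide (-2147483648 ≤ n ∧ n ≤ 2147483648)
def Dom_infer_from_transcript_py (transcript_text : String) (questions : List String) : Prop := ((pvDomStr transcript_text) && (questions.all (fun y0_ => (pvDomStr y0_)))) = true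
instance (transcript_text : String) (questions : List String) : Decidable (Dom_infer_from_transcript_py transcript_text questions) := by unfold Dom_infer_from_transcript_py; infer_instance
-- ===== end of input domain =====

-- B inverts the traversal: a single pass over the transcript accumulates up to 3 matching lines
-- for all ten rules simultaneously into a precomputed answer table, and each question is then a
-- pure first-match lookup into that table (objective: alternative; same results).

-- ===== PORT A =====
-- the loop of _find_relevant_lines: accumulate stripped matching lines, break at 3
def pyFindLoop (keywords : List String) (lines : List String) (ms0 : List String) : List String :=
  match lines with
  | [] => ms0
  | line :: rest =>
    let line_lower := PySem.Str.lower line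
    if keywords.any (fun kw => PySem.Str.isIn kw line_lower) then
      let ms := ms0 ++ [PySem.Str.strip line]
      if ms.length ≥ 3 then ms else pyFindLoop keywords rest ms
    else pyFindLoop keywords rest ms0

def findRelevantLines (lines : List String) (keywords : List String) : String :=
  let ms0 := pyFindLoop keywords lines []
  if ms0 ≠ [] then PySem.Str.join " | " ms0
  else "[No relevant content found in transcript]"

def infer_from_transcript_py (transcript_text : String) (questions : List String) : List String :=
  let lines := (PySem.Str.split? (PySem.Str.strip transcript_text) "\n").getD []
  questions.foldl (fun answers question =>
    let q_lower := PySem.Str.lower question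
    let answer :=
      if PySem.Str.isIn "hypothesis" q_lower || PySem.Str.isIn "conclusion" q_lower then
        findRelevantLines lines ["hypothesis", "conclusion", "strategy", "approach", "plan", "first"]
      else if PySem.Str.isIn "bskg" q_lower || PySem.Str.isIn "query" q_lower || PySem.Str.isIn "queries" q_lower then
        findRelevantLines lines ["query", "bskg", "alphaswarm", "graph"]
      else if PySem.Str.isIn "surprised" q_lower then
        findRelevantLines lines ["surprise", "unexpected", "surprising", "interesting"]
      else if PySem.Str.isIn "evidence" q_lower then
        findRelevantLines lines ["evidence", "found", "vulnerability", "finding", "supports"]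
      else if PySem.Str.isIn "contradict" q_lower then
        findRelevantLines lines ["contradict", "against", "however", "but", "alternatively"]
      else if PySem.Str.isIn "investigate" q_lower || PySem.Str.isIn "further" q_lower then
        findRelevantLines lines ["investigate", "further", "next", "explore", "deeper"]
      else if PySem.Str.isIn "confidence" q_lower || PySem.Str.isIn "rate" q_lower then
        findRelevantLines lines ["confidence", "certain", "sure", "rating", "high", "medium", "low"]
      else if PySem.Str.isIn "strategy" q_lower then
        findRelevantLines lines ["strategy", "approach", "plan", "first"]
      else if PySem.Str.isIn "alternative" q_lower then
        findRelevantLines lines ["alternative", "hypothesis", "consider", "reject"]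
      else if PySem.Str.isIn "differently" q_lower then
        findRelevantLines lines ["differently", "improve", "next time", "better"]
      else "[Could not infer from transcript]"
    answers ++ [answer]) []

-- ===== PORT B =====
def bRules : List (List String × List String) :=
  [ (["hypothesis", "conclusion"], ["hypothesis", "conclusion", "strategy", "approach", "plan", "first"]),
    (["bskg", "query", "queries"], ["query", "bskg", "alphaswarm", "graph"]),
    (["surprised"], ["surprise", "unexpected", "surprising", "interesting"]),
    (["evidence"], ["evidence", "found", "vulnerability", "finding", "supports"]),
    (["contradict"], ["contradict", "against", "however", "but", "alternatively"]),
    (["investigate", "further"], ["investigate", "further", "next", "explore", "deeper"]),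
    (["confidence", "rate"], ["confidence", "certain", "sure", "rating", "high", "medium", "low"]),
    (["strategy"], ["strategy", "approach", "plan", "first"]),
    (["alternative"], ["alternative", "hypothesis", "consider", "reject"]),
    (["differently"], ["differently", "improve", "next time", "better"]) ]

-- stage-2 lookup: first rule whose trigger occurs in the lowered question, with its precomputed answer
def bSelect (q_lower : String) : List ((List String × List String) × String) → String
  | [] => "[Could not infer from transcript]"
  | (rule, ans) :: rest =>
    if rule.1.any (fun t => PySem.Str.isIn t q_lower) then ans else bSelect q_lower rest

def infer_from_transcript_py_alt (transcript_text : String) (questions : List String) : List String :=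
  -- stage 1: one pass over the lines, all rules' accumulators advanced together
  let final := ((PySem.Str.split? (PySem.Str.strip transcript_text) "\n").getD []).foldl
    (fun st line => st.map (fun p =>
      if p.2.length < 3 && p.1.any (fun kw => PySem.Str.isIn kw (PySem.Str.lower line)) then
        (p.1, p.2 ++ [PySem.Str.strip line])
      else p))
    (bRules.map (fun r => (r.2, ([] : List String))))
  let table := final.map (fun p =>
    if p.2 ≠ [] then PySem.Str.join " | " p.2 else "[No relevant content found in transcript]")
  -- stage 2: per-question lookup
  questions.foldl (fun answers question =>
    answers ++ [bSelect (PySem.Str.lower question) (bRules.zip table)]) []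

-- ===== PRECONDITION & SPEC =====
def Spec_infer_from_transcript_py (transcript_text : String) (questions : List String) (out : List String) : Prop := out = infer_from_transcript_py_alt transcript_text questions
instance (transcript_text : String) (questions : List String) (out : List String) : Decidable (Spec_infer_from_transcript_py transcript_text questions out) := by unfold Spec_infer_from_transcript_py; infer_instance

-- ===== CLAIM (what is proved, stated in full; the proofs are below) =====
def Claim_equal_infer_from_transcript_py : Prop := ∀ (transcript_text : String) (questions : List String), Dom_infer_from_transcript_py transcript_text questions → Spec_infer_from_transcript_py transcript_text questions (infer_from_transcript_py transcript_text questions)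

-- ===== LEMMAS AND PROOFS =====

-- a fold whose step maps every state component independently = a map of per-component folds
theorem foldl_map_comm {α β : Type} (g : β → α → α) (s0 : List α) (lines : List β) :
    lines.foldl (fun st l => st.map (g l)) s0 = s0.map (fun x => lines.foldl (fun x l => g l x) x) := by
  induction lines generalizing s0 with
  | nil => simp
  | cons line rest ih => simp [ih, List.map_map, Function.comp_def]

-- the per-rule pair fold keeps its keywords and folds its accumulator
theorem pairFold (kws : List String) (lines : List String) (acc : List String) :
    lines.foldl (fun p line =>
        if p.2.length < 3 && p.1.any (fun kw => PySem.Str.isIn kw (PySem.Str.lower line)) then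
          (p.1, p.2 ++ [PySem.Str.strip line]) else p) (kws, acc)
    = (kws, lines.foldl (fun a line =>
        if a.length < 3 && kws.any (fun kw => PySem.Str.isIn kw (PySem.Str.lower line)) then
          a ++ [PySem.Str.strip line] else a) acc) := by
  induction lines generalizing acc with
  | nil => rfl
  | cons line rest ih =>
    simp only [List.foldl_cons]
    split_ifs with h <;> exact ih _

-- B's bounded accumulator computes: take (3 - |acc|) of the stripped matching lines
theorem accFold (kws : List String) (lines : List String) (acc : List String) (h : acc.length ≤ 3) :
    lines.foldl (fun a line =>
        if a.length < 3 && kws.any (fun kw => PySem.Str.isIn kw (PySem.Str.lower line)) then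
          a ++ [PySem.Str.strip line] else a) acc
    = acc ++ (((lines.filter (fun l => kws.any (fun kw => PySem.Str.isIn kw (PySem.Str.lower l)))).map
        PySem.Str.strip).take (3 - acc.length)) := by
  induction lines generalizing acc with
  | nil => simp
  | cons line rest ih =>
    simp only [List.foldl_cons, List.filter_cons]
    by_cases hm : kws.any (fun kw => PySem.Str.isIn kw (PySem.Str.lower line)) = true
    · by_cases hl : acc.length < 3
      · have h' : (acc ++ [PySem.Str.strip line]).length ≤ 3 := by simp; omega
        have hstep : 3 - acc.length = (3 - (acc ++ [PySem.Str.strip line]).length) + 1 := by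
          simp; omega
        rw [if_pos (by simp only [hm, Bool.and_true, decide_eq_true_eq]; exact hl),
          ih _ h', if_pos hm, hstep]
        simp [List.take_succ_cons]
      · have h3 : acc.length = 3 := by omega
        rw [if_neg (by simp [hl]), ih acc h]
        simp [h3]
    · have hm' : (kws.any fun kw => PySem.Str.isIn kw (PySem.Str.lower line)) = false :=
        Bool.eq_false_iff.mpr hm
      rw [if_neg (by rw [hm']; simp), if_neg (by rw [hm']; simp), ih acc h]

-- A's break-at-3 loop computes the same take-3 list
theorem pyFindLoop_eq (keywords : List String) (lines : List String) (ms0 : List String)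
    (h : ms0.length < 3) :
    pyFindLoop keywords lines ms0 =
      ms0 ++ (((lines.filter (fun l => keywords.any (fun kw => PySem.Str.isIn kw (PySem.Str.lower l)))).map
        PySem.Str.strip).take (3 - ms0.length)) := by
  induction lines generalizing ms0 with
  | nil => simp [pyFindLoop]
  | cons line rest ih =>
    simp only [pyFindLoop, List.filter_cons]
    split_ifs with hc hlen
    · have h2 : ms0.length = 2 := by simp at hlen; omega
      simp [h2, List.take_succ_cons]
    · have h' : (ms0 ++ [PySem.Str.strip line]).length < 3 := by simp at hlen ⊢; omega
      rw [ih _ h']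
      have : 3 - ms0.length = (3 - (ms0 ++ [PySem.Str.strip line]).length) + 1 := by
        simp; omega
      simp [this, List.take_succ_cons]
    · rw [ih _ h]

-- A's _find_relevant_lines in take-3 form
theorem findRelevant_eq (lines keywords : List String) :
    findRelevantLines lines keywords =
      (let hits := ((lines.filter (fun l => keywords.any (fun kw => PySem.Str.isIn kw (PySem.Str.lower l)))).map
          PySem.Str.strip).take 3
       if hits ≠ [] then PySem.Str.join " | " hits
       else "[No relevant content found in transcript]") := by
  simp only [findRelevantLines, pyFindLoop_eq keywords lines [] (by simp), List.nil_append,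
    List.length_nil, Nat.sub_zero]

-- B's precomputed table entry for a rule = A's findRelevantLines for that rule's keywords
theorem table_entry_eq (lines kws : List String) :
    (if (((lines.filter (fun l => kws.any (fun kw => PySem.Str.isIn kw (PySem.Str.lower l)))).map
          PySem.Str.strip).take 3) ≠ [] then
        PySem.Str.join " | " (((lines.filter (fun l => kws.any (fun kw => PySem.Str.isIn kw (PySem.Str.lower l)))).map
          PySem.Str.strip).take 3)
      else "[No relevant content found in transcript]")
    = findRelevantLines lines kws := by
  rw [findRelevant_eq]

theorem infer_from_transcript_py_spec : Claim_equal_infer_from_transcript_py := by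
  intro transcript_text questions _
  unfold Spec_infer_from_transcript_py infer_from_transcript_py infer_from_transcript_py_alt
  rw [foldl_map_comm]
  simp only [List.map_map, Function.comp_def]
  apply PySem.List.foldl_congr_mem
  intro answers q _
  congr 1
  congr 1
  simp only [pairFold, accFold _ _ [] (by simp), List.nil_append, List.length_nil, Nat.sub_zero]
  simp only [bRules, bSelect, List.map_cons, List.map_nil, List.zip_cons_cons, List.zip_nil_right,
    List.any_cons, List.any_nil, Bool.or_false, Bool.or_assoc, table_entry_eq]
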